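-- pv_equiv track=rewrite | github.com/GeKtoRiX/kokoroTTS | app.py | _is_abbrev
-- ===== SOURCE A (Python) =====
-- ABBREV_TITLES = {
--     'mr', 'ms', 'mrs', 'dr', 'prof', 'sr', 'jr', 'st', 'vs', 'etc'
-- }
--
-- ABBREV_DOTTED = {'e.g', 'i.e'}
--
-- def _is_abbrev(text, punct_index):
--     if punct_index >= 3:
--         dotted = text[punct_index - 3:punct_index].lower()
--         if dotted in ABBREV_DOTTED:
--             if punct_index == 3 or not text[punct_index - 4].isalnum():
--                 return True
--     i = punct_index - 1
--     while i >= 0 and text[i].isalpha():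
--         i -= 1
--     word = text[i + 1:punct_index].lower()
--     if not word:
--         return False
--     if word in ABBREV_TITLES:
--         if i < 0 or not text[i].isalnum():
--             return True
--     return False
-- ===== SOURCE B (Python) =====
-- # Different decomposition: one loop over all known abbreviations, testing a
-- # lowercased suffix slice plus a non-alnum boundary, instead of A's dotted
-- # special-case followed by a backward maximal-alpha-run scan and set lookup.
-- _ABBREVS = ('e.g', 'i.e', 'mr', 'ms', 'mrs', 'dr', 'prof', 'sr', 'jr', 'st', 'vs', 'etc')
--
-- def _is_abbrev(text, punct_index):
--     for abbr in _ABBREVS: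
--         n = len(abbr)
--         if punct_index >= n and text[punct_index - n:punct_index].lower() == abbr:
--             j = punct_index - n - 1
--             if j < 0 or not text[j].isalnum():
--                 return True
--     return False
-- ===== Notes on version B (the rewrite author's own statement) =====
-- stated objective: faster
-- what changed: Replaces A's dotted special-case plus O(punct_index) backward maximal-alpha-run scan and set lookup by a single loop over the twelve known abbreviations, each tested as a bounded lowercased suffix slice with a non-alnum boundary character.
import Mathlib
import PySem

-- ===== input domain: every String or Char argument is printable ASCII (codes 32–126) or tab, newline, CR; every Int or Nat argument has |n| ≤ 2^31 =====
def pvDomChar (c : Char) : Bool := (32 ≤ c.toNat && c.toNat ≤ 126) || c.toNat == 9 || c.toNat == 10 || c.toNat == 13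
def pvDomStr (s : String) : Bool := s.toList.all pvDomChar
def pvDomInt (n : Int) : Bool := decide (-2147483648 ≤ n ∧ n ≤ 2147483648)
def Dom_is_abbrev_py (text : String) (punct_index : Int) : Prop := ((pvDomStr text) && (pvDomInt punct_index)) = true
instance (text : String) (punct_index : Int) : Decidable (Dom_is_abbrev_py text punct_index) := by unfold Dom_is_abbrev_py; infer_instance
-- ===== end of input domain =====

-- B replaces A's dotted special-case plus backward maximal-alpha-run scan and set
-- lookup by one loop over all twelve abbreviations, each tested as a lowercased
-- suffix slice with a non-alnum boundary character (objective: simpler).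

-- ===== PORT A =====
def pvTitles : List (List Char) :=
  [['m','r'], ['m','s'], ['m','r','s'], ['d','r'], ['p','r','o','f'],
   ['s','r'], ['j','r'], ['s','t'], ['v','s'], ['e','t','c']]

def pvDotted : List (List Char) := [['e','.','g'], ['i','.','e']]

-- text[i].isalpha() / text[i].isalnum() at an Int index (in range on every use inside Pre_)
def pvAlphaAt (cs : List Char) (i : Int) : Bool :=
  match PySem.List.pyGet? cs i with
  | some c => PySem.Chars.isalpha c
  | none => false

def pvAlnumAt (cs : List Char) (i : Int) : Bool :=
  match PySem.List.pyGet? cs i with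
  | some c => PySem.Chars.isalnum c
  | none => false

-- the 'while i >= 0 and text[i].isalpha(): i -= 1' loop (structural recursion on the
-- fuel (i+1).toNat, which bounds the number of iterations; the state i is the same)
def pvScanGo (cs : List Char) : Nat → Int → Int
  | 0, i => i
  | fuel + 1, i => if 0 ≤ i ∧ pvAlphaAt cs i = true then pvScanGo cs fuel (i - 1) else i

def pvScan (cs : List Char) (i : Int) : Int := pvScanGo cs (i + 1).toNat i

-- the fall-through part of A after the dotted branch (word scan + title lookup)
def pvTitlePart (cs : List Char) (punct_index : Int) : Bool :=
  let i := pvScan cs (punct_index - 1)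
  let word := PySem.Chars.lower (PySem.List.slice cs (some (i + 1)) (some punct_index))
  if word = [] then false
  else if word ∈ pvTitles ∧ (i < 0 ∨ pvAlnumAt cs i = false) then true
  else false

def is_abbrev_py (text : String) (punct_index : Int) : Bool :=
  let cs := text.toList
  if 3 ≤ punct_index
      ∧ PySem.Chars.lower (PySem.List.slice cs (some (punct_index - 3)) (some punct_index)) ∈ pvDotted
      ∧ (punct_index = 3 ∨ pvAlnumAt cs (punct_index - 4) = false) then
    true
  else
    pvTitlePart cs punct_index

-- ===== PORT B =====
def pvAbbrevs : List (List Char) :=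
  [['e','.','g'], ['i','.','e'], ['m','r'], ['m','s'], ['m','r','s'], ['d','r'],
   ['p','r','o','f'], ['s','r'], ['j','r'], ['s','t'], ['v','s'], ['e','t','c']]

def is_abbrev_py_alt (text : String) (punct_index : Int) : Bool :=
  pvAbbrevs.any fun abbr =>
    let n : Int := abbr.length
    decide (n ≤ punct_index)
      && (PySem.Chars.lower (PySem.List.slice text.toList (some (punct_index - n)) (some punct_index)) == abbr)
      && (decide (punct_index - n - 1 < 0) || !pvAlnumAt text.toList (punct_index - n - 1))

-- ===== PRECONDITION & SPEC =====
-- Pre_ excludes exactly punct_index > len(text): there A raises IndexError (text[i] in its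
-- backward scan starts out of range) and returns no value; B returns False there.
def Pre_is_abbrev_py (text : String) (punct_index : Int) : Prop :=
  punct_index ≤ (text.length : Int)
instance (text : String) (punct_index : Int) : Decidable (Pre_is_abbrev_py text punct_index) := by
  unfold Pre_is_abbrev_py; infer_instance

def pvWitness_is_abbrev_py : String × Int := ("Dr.", 2)

def Spec_is_abbrev_py (text : String) (punct_index : Int) (out : Bool) : Prop := out = is_abbrev_py_alt text punct_index
instance (text : String) (punct_index : Int) (out : Bool) : Decidable (Spec_is_abbrev_py text punct_index out) := by unfold Spec_is_abbrev_py; infer_instance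

-- ===== CLAIM (what is proved, stated in full; the proofs are below) =====
def Claim_equal_is_abbrev_py : Prop := ∀ (text : String) (punct_index : Int), Dom_is_abbrev_py text punct_index → Pre_is_abbrev_py text punct_index → Spec_is_abbrev_py text punct_index (is_abbrev_py text punct_index)

-- ===== LEMMAS AND PROOFS =====

set_option maxRecDepth 10000

-- the common "suffix of length |w| equals w after lowering, with a non-alnum boundary" test
def pvST (cs : List Char) (pi : Int) (w : List Char) : Prop :=
  (w.length : Int) ≤ pi
  ∧ PySem.Chars.lower (PySem.List.slice cs (some (pi - (w.length : Int))) (some pi)) = w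
  ∧ (pi - (w.length : Int) - 1 < 0 ∨ pvAlnumAt cs (pi - (w.length : Int) - 1) = false)

lemma pv_bool_eq_of_iff {a b : Bool} (h : a = true ↔ b = true) : a = b := by
  cases a <;> cases b <;> simp_all

lemma pvB_iff (text : String) (pi : Int) :
    is_abbrev_py_alt text pi = true ↔ ∃ w ∈ pvAbbrevs, pvST text.toList pi w := by
  simp [is_abbrev_py_alt, pvST, List.any_eq_true, Bool.and_eq_true,
    beq_iff_eq, Bool.or_eq_true, and_assoc]

lemma pv_exists_abbrev_iff (cs : List Char) (pi : Int) :
    (∃ w ∈ pvAbbrevs, pvST cs pi w) ↔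
      ((pvST cs pi ['e','.','g'] ∨ pvST cs pi ['i','.','e']) ∨ ∃ w ∈ pvTitles, pvST cs pi w) := by
  simp [pvAbbrevs, pvTitles]; tauto

lemma pv_alpha_of_lower (c : Char) (h : PySem.Chars.isalpha (PySem.Chars.lowerChar c) = true) :
    PySem.Chars.isalpha c = true := by
  unfold PySem.Chars.lowerChar at h
  split at h
  · simp [PySem.Chars.isalpha, *]
  · exact h

lemma pv_alpha_false_of_alnum_false (cs : List Char) (i : Int)
    (h : pvAlnumAt cs i = false) : pvAlphaAt cs i = false := by
  unfold pvAlnumAt at h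
  unfold pvAlphaAt
  cases hg : PySem.List.pyGet? cs i with
  | none => rfl
  | some c =>
    rw [hg] at h
    unfold PySem.Chars.isalnum at h
    simp at h
    exact h.1

lemma pvScanGo_spec (cs : List Char) (m : Nat) (i : Int) (hub : i < (cs.length : Int))
    (hlb : -1 ≤ i) (hm : (i + 1).toNat ≤ m) :
    -1 ≤ pvScanGo cs m i ∧ pvScanGo cs m i ≤ i
      ∧ (∀ k, pvScanGo cs m i < k → k ≤ i → pvAlphaAt cs k = true)
      ∧ (pvScanGo cs m i < 0 ∨ pvAlphaAt cs (pvScanGo cs m i) = false) := by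
  induction m generalizing i with
  | zero =>
    have hi : i = -1 := by omega
    simp only [pvScanGo]
    refine ⟨by omega, le_refl _, fun k hk1 hk2 => by omega, by omega⟩
  | succ m ih =>
    simp only [pvScanGo]
    by_cases hc : 0 ≤ i ∧ pvAlphaAt cs i = true
    · rw [if_pos hc]
      have h := ih (i - 1) (by omega) (by omega) (by omega)
      refine ⟨h.1, by omega, fun k hk1 hk2 => ?_, h.2.2.2⟩
      rcases lt_or_ge k i with hk | hk
      · exact h.2.2.1 k hk1 (by omega)
      · have : k = i := by omega
        rw [this]; exact hc.2
    · rw [if_neg hc]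
      refine ⟨hlb, le_refl _, fun k hk1 hk2 => by omega, ?_⟩
      by_cases h0 : 0 ≤ i
      · right
        have hna : ¬ pvAlphaAt cs i = true := fun ha => hc ⟨h0, ha⟩
        simpa using hna
      · left; omega

lemma pvScan_spec (cs : List Char) (i : Int) (hub : i < (cs.length : Int)) (hlb : -1 ≤ i) :
    -1 ≤ pvScan cs i ∧ pvScan cs i ≤ i
      ∧ (∀ k, pvScan cs i < k → k ≤ i → pvAlphaAt cs k = true)
      ∧ (pvScan cs i < 0 ∨ pvAlphaAt cs (pvScan cs i) = false) := by
  unfold pvScan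
  exact pvScanGo_spec cs (i + 1).toNat i hub hlb (le_refl _)

lemma pvScan_eq (cs : List Char) (i a : Int) (hlb : -1 ≤ a) (hai : a ≤ i)
    (hub : i < (cs.length : Int))
    (hall : ∀ k, a < k → k ≤ i → pvAlphaAt cs k = true)
    (hstop : a < 0 ∨ pvAlphaAt cs a = false) : pvScan cs i = a := by
  have h := pvScan_spec cs i hub (by omega)
  rcases lt_trichotomy (pvScan cs i) a with hlt | heq | hgt
  · exfalso
    have ha := h.2.2.1 a hlt hai
    rcases hstop with h1 | h2
    · omega
    · rw [ha] at h2; exact absurd h2 (by simp)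
  · exact heq
  · exfalso
    have hj := hall (pvScan cs i) hgt h.2.1
    rcases h.2.2.2 with h1 | h2
    · omega
    · rw [hj] at h2; exact absurd h2 (by simp)

lemma pv_slice_eval (cs : List Char) (a b : Int) (h0 : 0 ≤ a) (hab : a ≤ b)
    (hb : b ≤ (cs.length : Int)) :
    PySem.List.slice cs (some a) (some b) = (cs.drop a.toNat).take (b.toNat - a.toNat) :=
  PySem.List.slice_of_nonneg cs h0 (by omega) (by omega) hb

lemma pv_slice_length (cs : List Char) (a b : Int) (h0 : 0 ≤ a) (hab : a ≤ b)
    (hb : b ≤ (cs.length : Int)) :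
    ((PySem.List.slice cs (some a) (some b)).length : Int) = b - a := by
  rw [pv_slice_eval cs a b h0 hab hb]
  simp [List.length_take, List.length_drop]
  omega

-- titles are nonempty all-alpha words
lemma pv_titles_ok : ∀ w ∈ pvTitles, w ≠ [] ∧ ∀ c ∈ w, PySem.Chars.isalpha c = true := by
  intro w hw
  fin_cases hw <;> refine ⟨by simp, ?_⟩ <;> intro c hc <;> fin_cases hc <;> decide

-- chars under a slice whose lowering is an all-alpha word are alpha
lemma pv_slice_all_alpha (cs : List Char) (pi : Int) (w : List Char)
    (hpi : pi ≤ (cs.length : Int)) (hk : (w.length : Int) ≤ pi) (h0 : 0 ≤ pi - w.length)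
    (hlow : PySem.Chars.lower (PySem.List.slice cs (some (pi - (w.length : Int))) (some pi)) = w)
    (halpha : ∀ c ∈ w, PySem.Chars.isalpha c = true) :
    ∀ k : Int, pi - w.length ≤ k → k ≤ pi - 1 → pvAlphaAt cs k = true := by
  intro k hk1 hk2
  have h0k : 0 ≤ k := by omega
  unfold pvAlphaAt
  rw [PySem.List.pyGet?_of_nonneg cs h0k]
  rw [pv_slice_eval cs (pi - (w.length : Int)) pi h0 (by omega) hpi] at hlow
  have hchain : cs[k.toNat]? =
      ((cs.drop (pi - (w.length : Int)).toNat).take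
        (pi.toNat - (pi - (w.length : Int)).toNat))[k.toNat - (pi - (w.length : Int)).toNat]? := by
    rw [List.getElem?_take, if_pos (by omega), List.getElem?_drop]
    congr 1
    omega
  cases hcv : cs[k.toNat]? with
  | none =>
    rw [List.getElem?_eq_none_iff] at hcv
    omega
  | some c =>
    have hmap : (PySem.Chars.lower ((cs.drop (pi - (w.length : Int)).toNat).take
        (pi.toNat - (pi - (w.length : Int)).toNat)))[k.toNat - (pi - (w.length : Int)).toNat]?
        = some (PySem.Chars.lowerChar c) := by
      unfold PySem.Chars.lower
      rw [List.getElem?_map, ← hchain, hcv]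
      rfl
    rw [hlow] at hmap
    exact pv_alpha_of_lower c (halpha _ (List.mem_of_getElem? hmap))

-- A's title part equals "some title passes B's suffix test", for 0 < pi ≤ len
lemma pv_title_iff (cs : List Char) (pi : Int) (hpos : 0 < pi) (hpi : pi ≤ (cs.length : Int)) :
    pvTitlePart cs pi = true ↔ ∃ w ∈ pvTitles, pvST cs pi w := by
  have hspec := pvScan_spec cs (pi - 1) (by omega) (by omega)
  set j := pvScan cs (pi - 1) with hj
  constructor
  · intro h
    simp only [pvTitlePart] at h
    rw [← hj] at h
    set word := PySem.Chars.lower (PySem.List.slice cs (some (j + 1)) (some pi)) with hword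
    split at h
    next hne => simp at h
    next hne =>
      split at h
      next hcond =>
        have hwl : (word.length : Int) = pi - (j + 1) := by
          rw [hword]
          unfold PySem.Chars.lower
          rw [List.length_map]
          exact pv_slice_length cs (j + 1) pi (by omega) (by omega) hpi
        refine ⟨word, hcond.1, ?_⟩
        unfold pvST
        have e1 : pi - (word.length : Int) = j + 1 := by omega
        rw [e1]
        have e3 : j + 1 - 1 = j := by ring
        rw [e3]
        refine ⟨by omega, hword.symm, ?_⟩
        rcases hcond.2 with h1 | h2
        · left; omega
        · right; exact h2
      next hcond => simp at h
  · rintro ⟨w, hw, hst⟩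
    obtain ⟨hne, halpha⟩ := pv_titles_ok w hw
    unfold pvST at hst
    obtain ⟨hk, hlow, hbnd⟩ := hst
    have hwpos : 0 < w.length := List.length_pos_iff.mpr hne
    have hjeq : j = pi - w.length - 1 := by
      rw [hj]
      refine pvScan_eq cs (pi - 1) (pi - (w.length : Int) - 1) (by omega) (by omega) (by omega) ?_ ?_
      · intro k hk1 hk2
        exact pv_slice_all_alpha cs pi w hpi hk (by omega) hlow halpha k (by omega) hk2
      · rcases hbnd with h1 | h2
        · left; omega
        · right; exact pv_alpha_false_of_alnum_false cs _ h2
    simp only [pvTitlePart]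
    rw [← hj, hjeq]
    have harg : pi - (w.length : Int) - 1 + 1 = pi - (w.length : Int) := by ring
    rw [harg, hlow, if_neg hne, if_pos ⟨hw, hbnd⟩]

-- the dotted branch condition equals "e.g or i.e passes B's suffix test"
lemma pv_dotted_iff (cs : List Char) (pi : Int) :
    (3 ≤ pi
      ∧ PySem.Chars.lower (PySem.List.slice cs (some (pi - 3)) (some pi)) ∈ pvDotted
      ∧ (pi = 3 ∨ pvAlnumAt cs (pi - 4) = false))
    ↔ (pvST cs pi ['e','.','g'] ∨ pvST cs pi ['i','.','e']) := by
  have hl : ((['e','.','g'] : List Char).length : Int) = 3 := by norm_num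
  have hl2 : ((['i','.','e'] : List Char).length : Int) = 3 := by norm_num
  unfold pvST
  rw [hl, hl2]
  have e : pi - (3 : Int) - 1 = pi - 4 := by ring
  rw [e]
  simp only [pvDotted, List.mem_cons, List.not_mem_nil, or_false]
  constructor
  · rintro ⟨h3, hm, hb⟩
    have hb' : pi - 4 < 0 ∨ pvAlnumAt cs (pi - 4) = false := by
      rcases hb with h | h
      · left; omega
      · right; exact h
    rcases hm with hm | hm
    · exact Or.inl ⟨h3, hm, hb'⟩
    · exact Or.inr ⟨h3, hm, hb'⟩
  · rintro (⟨h3, hm, hb⟩ | ⟨h3, hm, hb⟩)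
    · refine ⟨h3, Or.inl hm, ?_⟩
      rcases hb with h | h
      · exact Or.inl (by omega)
      · exact Or.inr h
    · refine ⟨h3, Or.inr hm, ?_⟩
      rcases hb with h | h
      · exact Or.inl (by omega)
      · exact Or.inr h

-- B returns False for nonpositive punct_index
lemma pvB_nonpos (text : String) (pi : Int) (h : pi ≤ 0) : is_abbrev_py_alt text pi = false := by
  apply List.any_eq_false.mpr
  intro w hw hb
  simp only [Bool.and_eq_true, decide_eq_true_eq] at hb
  have h2 : 2 ≤ w.length := by
    fin_cases hw <;> simp
  omega

-- A returns False for nonpositive punct_index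
lemma pvA_nonpos (text : String) (pi : Int) (h : pi ≤ 0) : is_abbrev_py text pi = false := by
  have hng : ¬(3 ≤ pi
      ∧ PySem.Chars.lower (PySem.List.slice text.toList (some (pi - 3)) (some pi)) ∈ pvDotted
      ∧ (pi = 3 ∨ pvAlnumAt text.toList (pi - 4) = false)) := by
    rintro ⟨h3, -, -⟩
    omega
  simp only [is_abbrev_py]
  rw [if_neg hng]
  simp only [pvTitlePart]
  have hscan : pvScan text.toList (pi - 1) = pi - 1 := by
    unfold pvScan
    have e0 : (pi - 1 + 1).toNat = 0 := by omega
    rw [e0]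
    rfl
  rw [hscan]
  have e : pi - 1 + 1 = pi := by ring
  rw [e]
  have hs : PySem.List.slice text.toList (some pi) (some pi) = [] := by
    simp [PySem.List.slice]
  rw [hs]
  simp [PySem.Chars.lower]

-- ===== VERDICT (by name: the statement is the Claim_ definition above) =====
theorem is_abbrev_py_spec : Claim_equal_is_abbrev_py := by
  intro text pi _ hpre
  unfold Spec_is_abbrev_py
  unfold Pre_is_abbrev_py at hpre
  rcases le_or_gt pi 0 with h0 | h0
  · rw [pvA_nonpos text pi h0, pvB_nonpos text pi h0]
  · have hpi : pi ≤ (text.toList.length : Int) := hpre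
    apply pv_bool_eq_of_iff
    rw [pvB_iff, pv_exists_abbrev_iff, ← pv_dotted_iff, ← pv_title_iff text.toList pi h0 hpi]
    simp only [is_abbrev_py]
    split
    · rename_i hcond
      simp [hcond]
    · rename_i hcond
      simp [hcond]
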